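-- pv_equiv track=rewrite | github.com/pypi-data/pypi-mirror-46 | packages/umis/umis-1.0.3-cp36-cp36m-macosx_10_7_x86_64.whl/umis/barcodes.py | mutationhash
-- ===== SOURCE A (Python) =====
-- import itertools
-- from collections import defaultdict
--
-- def mutationhash(strings, nedit):
--     """
--     produce a hash with each key a nedit distance substitution for a set of
--     strings. values of the hash is the set of strings the substitution could
--     have come from
--     """
--     maxlen = max([len(string) for string in strings])
--     indexes = generate_idx(maxlen, nedit)
--     muthash = defaultdict(set)
--     for string in strings:
--         muthash[string].update([string])
--         for x in substitution_set(string, indexes):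
--             muthash[x].update([string])
--     return muthash
--
-- def substitution_set(string, indexes):
--     """
--     for a string, return a set of all possible substitutions
--     """
--     strlen = len(string)
--     return {mutate_string(string, x) for x in indexes if valid_substitution(strlen, x)}
--
-- def valid_substitution(strlen, index):
--     """
--     skip performing substitutions that are outside the bounds of the string
--     """
--     values = index[0]
--     return all([strlen > i for i in values])
--
-- def generate_idx(maxlen, nedit):
--     """
--     generate all possible nedit edits of a string. each item has the form
--     ((index1, index2), 'A', 'G')  for nedit=2
--     index1 will be replaced by 'A', index2 by 'G'
--
--     this covers all edits < nedit as well since some of the specified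
--     substitutions will not change the base
--     """
--     ALPHABET = ["A", "C", "G", "T", "N"]
--     indexlists = []
--     ALPHABETS = [ALPHABET for x in range(nedit)]
--     return list(itertools.product(itertools.combinations(range(maxlen), nedit),
--                                   *ALPHABETS))
--
-- def mutate_string(string, tomutate):
--     strlist = list(string)
--     for i, idx in enumerate(tomutate[0]):
--         strlist[idx] = tomutate[i+1]
--     return "".join(strlist)
-- ===== SOURCE B (Python) =====
-- import itertools
-- from collections import defaultdict
--
-- def mutationhash(strings, nedit):
--     """
--     produce a hash with each key a nedit distance substitution for a set of
--     strings. values of the hash is the set of strings the substitution could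
--     have come from
--     """
--     muthash = defaultdict(set)
--     letter_tuples = None  # built once, on first use
--     for string in strings:
--         muthash[string].add(string)
--         if nedit <= len(string):
--             chars = list(string)
--             subs = set()
--             for positions in itertools.combinations(range(len(string)), nedit):
--                 if letter_tuples is None:
--                     letter_tuples = list(itertools.product("ACGTN", repeat=nedit))
--                 for letters in letter_tuples:
--                     mutated = chars[:]
--                     for pos, letter in zip(positions, letters):
--                         mutated[pos] = letter
--                     subs.add("".join(mutated))
--             for x in subs:
--                 muthash[x].add(string)
--     return muthash
-- ===== Notes on version B (the rewrite author's own statement) =====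
-- stated objective: simpler
-- what changed: Instead of precomputing one global (positions, letters) index table for the longest string and re-filtering it per string with valid_substitution, B generates each string's substitution set directly from combinations(range(len(string)), nedit) x product('ACGTN', repeat=nedit), skipping strings shorter than nedit, with no maxlen pass and no filter pass.
-- crash fix: On an empty strings list A raises ValueError (max() of an empty sequence) while B naturally returns an empty defaultdict. — e.g. on mutationhash([], 1): A raises ValueError, B returns []
import Mathlib
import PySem

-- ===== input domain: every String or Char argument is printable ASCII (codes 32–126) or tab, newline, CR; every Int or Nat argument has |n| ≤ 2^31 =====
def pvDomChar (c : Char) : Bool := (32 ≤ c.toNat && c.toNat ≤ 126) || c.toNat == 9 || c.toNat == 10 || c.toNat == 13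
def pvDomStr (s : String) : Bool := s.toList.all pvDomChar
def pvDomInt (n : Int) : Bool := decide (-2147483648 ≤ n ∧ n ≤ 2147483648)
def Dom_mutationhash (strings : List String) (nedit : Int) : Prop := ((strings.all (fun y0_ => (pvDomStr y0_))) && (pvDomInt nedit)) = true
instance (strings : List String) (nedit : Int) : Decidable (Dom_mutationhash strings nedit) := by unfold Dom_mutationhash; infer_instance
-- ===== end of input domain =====

-- B replaces A's global maxlen index table and its per-string valid_substitution filter by
-- direct per-string generation of the substitutions (simpler: no maxlen pass, no filter pass).

-- shared ports of the itertools the two Pythons call: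
-- itertools.combinations(l, k) (l a list of distinct ints), in itertools order
def pvCombos : List Nat → Nat → List (List Nat)
  | _, 0 => [[]]
  | [], _ + 1 => []
  | x :: t, k + 1 => ((pvCombos t k).map (fun ps => x :: ps)) ++ pvCombos t (k + 1)

def pvAlphabet : List Char := ['A', 'C', 'G', 'T', 'N']

-- itertools.product(ALPHABET, repeat = k), in itertools order (leftmost letter varies slowest)
def pvLetters : Nat → List (List Char)
  | 0 => [[]]
  | k + 1 => pvAlphabet.flatMap (fun c => (pvLetters k).map (fun ls => c :: ls))

-- muthash[k].update([s]) / muthash[k].add(s) on a defaultdict(set)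
def pvUpd (d : PySem.Dict String (PySem.Set String)) (k s : String) :
    PySem.Dict String (PySem.Set String) :=
  d.modify k PySem.Set.empty (fun v => PySem.Set.add v s)

-- ===== PORT A =====
-- generate_idx(maxlen, nedit): a tuple ((i1,…,ik), l1, …, lk) is represented as (positions, letters)
def generateIdx (maxlen nedit : Nat) : List (List Nat × List Char) :=
  (pvCombos (List.range maxlen) nedit).flatMap
    (fun ps => (pvLetters nedit).map (fun ls => (ps, ls)))

-- mutate_string: strlist[idx] = tomutate[i+1]; the tuple's element i+1 is letters[i].
-- The default 'A' is never read: A only calls this through valid_substitution, i in range.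
def mutateString (s : String) (tomutate : List Nat × List Char) : String :=
  String.mk ((PySem.List.enumerate tomutate.1).foldl
    (fun cs p => cs.set p.2 (PySem.List.pyGetD tomutate.2 p.1 'A')) s.toList)

def validSubstitution (strlen : Nat) (index : List Nat × List Char) : Bool :=
  index.1.all (fun i => strlen > i)

-- the set comprehension {mutate_string(string, x) for x in indexes if valid_substitution(strlen, x)}
def substitutionSet (s : String) (indexes : List (List Nat × List Char)) : PySem.Set String :=
  PySem.Set.ofList
    ((indexes.filter (fun x => validSubstitution s.toList.length x)).map (fun x => mutateString s x))

-- max([len(string) for string in strings]): raises ValueError on [] (excluded by Pre_);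
-- nedit.toNat: combinations raises ValueError for negative nedit (excluded by Pre_)
def mutationhash (strings : List String) (nedit : Int) : List (String × List String) :=
  let maxlen := (strings.map (fun s => s.toList.length)).foldl max 0
  let indexes := generateIdx maxlen nedit.toNat
  (strings.foldl
    (fun d string =>
      (substitutionSet string indexes).foldl (fun d x => pvUpd d x string)
        (pvUpd d string string))
    PySem.Dict.empty).items

-- ===== PORT B =====
-- per-string generation: combinations(range(len(string)), nedit) × product('ACGTN', repeat=nedit),
-- mutated list built by assigning zip(positions, letters) into a copy of list(string); the
-- substitutions are collected in the per-string set subs and then added to the defaultdict;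
-- strings shorter than nedit (no position tuple exists) are skipped outright.
-- Source B memoises list(product(...)) in letter_tuples on first use; pure Lean needs no cache,
-- the same value pvLetters nedit.toNat is just referenced in place
def mutationhash_alt (strings : List String) (nedit : Int) : List (String × List String) :=
  (strings.foldl
    (fun d string =>
      let d1 := pvUpd d string string
      if nedit ≤ (string.toList.length : Int) then
        let subs :=
          (pvCombos (List.range string.toList.length) nedit.toNat).foldl
            (fun subs positions =>
              (pvLetters nedit.toNat).foldl
                (fun subs letters =>
                  PySem.Set.add subs (String.mk ((positions.zip letters).foldl
                    (fun cs q => cs.set q.1 q.2) string.toList)))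
                subs)
            PySem.Set.empty
        subs.foldl (fun d x => pvUpd d x string) d1
      else d1)
    PySem.Dict.empty).items

-- ===== PRECONDITION & SPEC =====
-- A raises ValueError on an empty strings list (max of an empty sequence) and on negative nedit
-- (itertools.combinations); Pre_ excludes exactly those inputs.
def Pre_mutationhash (strings : List String) (nedit : Int) : Prop :=
  strings ≠ [] ∧ 0 ≤ nedit
instance (strings : List String) (nedit : Int) : Decidable (Pre_mutationhash strings nedit) := by
  unfold Pre_mutationhash; infer_instance
def pvWitness_mutationhash : List String × Int := (["AC", "G"], 1)

-- On an empty strings list A raises ValueError (max() of an empty sequence) while B returns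
-- the empty dict, the natural value of the per-string loop.
def Raises_mutationhash (strings : List String) (nedit : Int) : Prop := strings = []
instance (strings : List String) (nedit : Int) : Decidable (Raises_mutationhash strings nedit) := by
  unfold Raises_mutationhash; infer_instance
def pvRaiseWitness_mutationhash : List String × Int := ([], 1)
def pvRaiseWitnessOut_mutationhash : List (String × List String) := []

def Spec_mutationhash (strings : List String) (nedit : Int) (out : List (String × List String)) : Prop := out = mutationhash_alt strings nedit
instance (strings : List String) (nedit : Int) (out : List (String × List String)) : Decidable (Spec_mutationhash strings nedit out) := by unfold Spec_mutationhash; infer_instance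

-- ===== CLAIM (what is proved, stated in full; the proofs are below) =====
def Claim_equal_mutationhash : Prop := ∀ (strings : List String) (nedit : Int), Dom_mutationhash strings nedit → Pre_mutationhash strings nedit → Spec_mutationhash strings nedit (mutationhash strings nedit)
def Claim_raises_mutationhash : Prop := (∀ (strings : List String) (nedit : Int), Dom_mutationhash strings nedit → Raises_mutationhash strings nedit → ¬ Pre_mutationhash strings nedit) ∧ (Dom_mutationhash (pvRaiseWitness_mutationhash.1) (pvRaiseWitness_mutationhash.2) ∧ Raises_mutationhash (pvRaiseWitness_mutationhash.1) (pvRaiseWitness_mutationhash.2) ∧ mutationhash_alt (pvRaiseWitness_mutationhash.1) (pvRaiseWitness_mutationhash.2) = pvRaiseWitnessOut_mutationhash)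

-- ===== LEMMAS AND PROOFS =====

-- every member of pvCombos l k has length k and elements of l
theorem pvCombos_mem : ∀ (l : List Nat) (k : Nat) (ps : List Nat), ps ∈ pvCombos l k →
    ps.length = k ∧ ∀ a ∈ ps, a ∈ l := by
  intro l
  induction l with
  | nil => intro k ps h; cases k with
    | zero => simp [pvCombos] at h; simp [h]
    | succ k => simp [pvCombos] at h
  | cons x t ih =>
    intro k ps h
    cases k with
    | zero => simp [pvCombos] at h; simp [h]
    | succ k =>
      simp only [pvCombos, List.mem_append, List.mem_map] at h
      rcases h with ⟨qs, hqs, rfl⟩ | h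
      · obtain ⟨h1, h2⟩ := ih k qs hqs
        constructor
        · simp [h1]
        · intro a ha; rcases List.mem_cons.1 ha with rfl | ha
          · exact List.mem_cons_self
          · exact List.mem_cons_of_mem _ (h2 a ha)
      · obtain ⟨h1, h2⟩ := ih (k+1) ps h
        exact ⟨h1, fun a ha => List.mem_cons_of_mem _ (h2 a ha)⟩

-- no combinations exist when more positions are asked for than the list has
theorem pvCombos_nil : ∀ (l : List Nat) (k : Nat), l.length < k → pvCombos l k = [] := by
  intro l
  induction l with
  | nil => intro k h; cases k with
    | zero => simp at h
    | succ k => rfl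
  | cons x t ih =>
    intro k h
    cases k with
    | zero => simp at h
    | succ k =>
      simp only [pvCombos]
      rw [ih k (by simpa using h), ih (k+1) (by simp at h; omega)]
      simp

theorem pvLetters_mem : ∀ (k : Nat) (ls : List Char), ls ∈ pvLetters k → ls.length = k := by
  intro k
  induction k with
  | zero => intro ls h; simp [pvLetters] at h; simp [h]
  | succ k ih =>
    intro ls h
    simp only [pvLetters, List.mem_flatMap, List.mem_map] at h
    obtain ⟨c, _, ls', hls', rfl⟩ := h
    simp [ih ls' hls']

-- filtering the combinations of l₁ ++ l₂ by "all elements satisfy p" yields the combinations of l₁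
theorem pvCombos_filter (p : Nat → Bool) : ∀ (l₁ l₂ : List Nat) (k : Nat),
    (∀ x ∈ l₁, p x = true) → (∀ x ∈ l₂, p x = false) →
    (pvCombos (l₁ ++ l₂) k).filter (fun ps => ps.all p) = pvCombos l₁ k := by
  intro l₁
  induction l₁ with
  | nil =>
    intro l₂ k h1 h2
    cases k with
    | zero => simp [pvCombos]
    | succ k =>
      simp only [List.nil_append, pvCombos]
      rw [List.filter_eq_nil_iff]
      intro ps hps
      obtain ⟨hlen, hmem⟩ := pvCombos_mem l₂ (k+1) ps hps
      cases ps with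
      | nil => simp at hlen
      | cons a ps =>
        simp only [List.all_cons, Bool.and_eq_true, not_and]
        intro ha
        rw [h2 a (hmem a List.mem_cons_self)] at ha
        exact absurd ha (by simp)
  | cons x t ih =>
    intro l₂ k h1 h2
    cases k with
    | zero => simp [pvCombos]
    | succ k =>
      simp only [List.cons_append, pvCombos, List.filter_append, List.filter_map]
      have hx : p x = true := h1 x List.mem_cons_self
      have ht : ∀ y ∈ t, p y = true := fun y hy => h1 y (List.mem_cons_of_mem _ hy)
      congr 1
      · rw [show ((fun ps => ps.all p) ∘ fun ps => x :: ps) = (fun ps => ps.all p) from ?_,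
          ih l₂ k ht h2]
        funext ps; simp [hx]
      · exact ih l₂ (k+1) ht h2

-- the one fact the re-implementation rests on: A's global index list for maxlen, filtered by
-- valid_substitution for a string of length n ≤ maxlen, is exactly B's per-string index list
theorem pvCombos_range_filter (n m k : Nat) (h : n ≤ m) :
    (pvCombos (List.range m) k).filter (fun ps => ps.all (fun i => n > i)) =
      pvCombos (List.range n) k := by
  have hsplit : List.range m = List.range n ++ (List.range (m - n)).map (n + ·) := by
    rw [← List.range_add, Nat.add_sub_cancel' h]
  rw [hsplit, pvCombos_filter]
  · intro x hx; simp at hx; simp [hx]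
  · intro x hx; simp at hx
    obtain ⟨a, _, rfl⟩ := hx
    simp

theorem filter_flatMap_fst {α β : Type} (q : α → Bool) (m : List β) :
    ∀ l : List α,
      (l.flatMap (fun a => m.map (fun b => (a, b)))).filter (fun x => q x.1) =
        (l.filter q).flatMap (fun a => m.map (fun b => (a, b))) := by
  intro l
  induction l with
  | nil => simp
  | cons a l ih =>
    simp only [List.flatMap_cons, List.filter_append, List.filter_map, List.filter_cons]
    by_cases hq : q a = true
    · simp only [hq, if_pos trivial, List.flatMap_cons, ih]
      congr 1
      have : ((fun x : α × β => q x.1) ∘ fun b => (a, b)) = fun _ => true := by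
        funext b; simp [hq]
      rw [this, List.filter_true]
    · simp only [Bool.not_eq_true] at hq
      simp only [hq, Bool.false_eq_true, if_false, ih]
      have : ((fun x : α × β => q x.1) ∘ fun b => (a, b)) = fun _ => false := by
        funext b; simp [hq]
      rw [this, List.filter_false]
      simp

-- A's indexed mutate loop equals B's zip loop
theorem mut_fold (L : List Char) : ∀ (ps : List Nat) (tail : List Char) (j : Nat)
    (cs : List Char), ps.length = tail.length → L.drop j = tail →
    (PySem.List.enumerate ps (j : Int)).foldl
        (fun cs p => cs.set p.2 (PySem.List.pyGetD L p.1 'A')) cs =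
      (ps.zip tail).foldl (fun cs q => cs.set q.1 q.2) cs := by
  intro ps
  induction ps with
  | nil => intro tail j cs _ _; simp [PySem.List.enumerate]
  | cons a ps ih =>
    intro tail j cs hlen hdrop
    cases tail with
    | nil => simp at hlen
    | cons b tail =>
      simp only [PySem.List.enumerate, List.zip_cons_cons, List.foldl_cons]
      have hj : j < L.length := by
        by_contra hc
        rw [List.drop_eq_nil_of_le (by omega)] at hdrop
        exact absurd hdrop (by simp)
      have hget : PySem.List.pyGetD L (j : Int) 'A' = b := by
        rw [PySem.List.pyGetD_of_nonneg L 'A' (by positivity)]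
        simp only [Int.toNat_natCast]
        have h0 : (L.drop j)[0]? = L[j + 0]? := List.getElem?_drop
        rw [hdrop] at h0
        simp at h0
        rw [List.getD_eq_getElem?_getD, ← h0]
        rfl
      rw [hget]
      have hcast : ((j : Int) + 1) = ((j + 1 : Nat) : Int) := by push_cast; ring
      rw [hcast, ih tail (j+1) _ (by simpa using hlen) ?_]
      rw [← List.drop_drop, hdrop]
      simp

theorem foldl_flatMap {α β δ : Type} (f : α → List β) (g : δ → β → δ) :
    ∀ (l : List α) (d : δ), (l.flatMap f).foldl g d = l.foldl (fun d a => (f a).foldl g d) d := by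
  intro l
  induction l with
  | nil => intro d; rfl
  | cons a l ih => intro d; simp [List.flatMap_cons, List.foldl_append, ih]

-- the per-string substitution set of A equals the per-string set B builds directly
-- (n := length of the string ≤ maxlen)
theorem step_eq (maxlen k : Nat) (s : String) (hlen : s.toList.length ≤ maxlen) :
    substitutionSet s (generateIdx maxlen k) =
      (pvCombos (List.range s.toList.length) k).foldl
        (fun subs positions =>
          (pvLetters k).foldl
            (fun subs letters =>
              PySem.Set.add subs (String.mk ((positions.zip letters).foldl
                (fun cs q => cs.set q.1 q.2) s.toList)))
            subs)
        PySem.Set.empty := by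
  have h1 : (generateIdx maxlen k).filter (fun x => validSubstitution s.toList.length x) =
      (pvCombos (List.range s.toList.length) k).flatMap
        (fun ps => (pvLetters k).map (fun ls => (ps, ls))) := by
    unfold generateIdx
    have hq := filter_flatMap_fst (fun ps : List Nat => ps.all (fun i => s.toList.length > i))
      (pvLetters k) (pvCombos (List.range maxlen) k)
    simp only [validSubstitution]
    rw [hq, pvCombos_range_filter _ _ _ hlen]
  have h2 : substitutionSet s (generateIdx maxlen k) =
      PySem.Set.ofList ((pvCombos (List.range s.toList.length) k).flatMap
        (fun ps => (pvLetters k).map (fun ls => mutateString s (ps, ls)))) := by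
    unfold substitutionSet
    rw [h1, List.map_flatMap]
    simp [Function.comp_def]
  rw [h2, PySem.Set.ofList_eq_foldl, foldl_flatMap]
  apply PySem.List.foldl_congr_mem
  intro acc ps hps
  rw [List.foldl_map]
  apply PySem.List.foldl_congr_mem
  intro acc2 ls hls
  have hmut : mutateString s (ps, ls) =
      String.mk ((ps.zip ls).foldl (fun cs q => cs.set q.1 q.2) s.toList) := by
    unfold mutateString
    congr 1
    have := mut_fold ls ps ls 0 s.toList
      (by rw [(pvCombos_mem _ _ _ hps).1, pvLetters_mem _ _ hls]) (by simp)
    simpa using this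
  rw [hmut]

-- ===== VERDICT (by name: the statement is the Claim_ definition above) =====
theorem mutationhash_spec : Claim_equal_mutationhash := by
  intro strings nedit _ hpre
  unfold Spec_mutationhash mutationhash mutationhash_alt
  refine congrArg PySem.Dict.items ?_
  apply PySem.List.foldl_congr_mem
  intro d s hs
  have hlen : s.toList.length ≤ (strings.map (fun s => s.toList.length)).foldl max 0 :=
    (PySem.List.le_foldl_max (strings.map (fun s => s.toList.length)) 0).2
      s.toList.length (List.mem_map_of_mem hs)
  rw [step_eq _ nedit.toNat s hlen]
  by_cases hk : nedit ≤ (s.toList.length : Int)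
  · rw [if_pos hk]
  · -- the string is shorter than nedit: no position tuple exists, both sides add nothing
    rw [if_neg hk]
    have h0 : 0 ≤ nedit := hpre.2
    rw [pvCombos_nil (List.range s.toList.length) nedit.toNat
      (by simp only [List.length_range]; omega)]
    rfl

@[simp] theorem mutationhash_raises : Claim_raises_mutationhash := by
  unfold Claim_raises_mutationhash
  exact ⟨fun strings nedit _ hr hp => hp.1 hr, by decide⟩
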